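-- pv_equiv track=rewrite | github.com/herald-email/herald-mail-app | .agents/skills/herald-autopilot/scripts/phase_impact.py | count_skipped_gates
-- ===== SOURCE A (Python) =====
-- from typing import Any
--
-- def count_skipped_gates(run: dict[str, Any]) -> int:
--     latest_by_gate: dict[str, dict[str, Any]] = {}
--     skipped_without_gate = 0
--     for item in run.get("verification", {}).get("results", []):
--         gate = item.get("gate")
--         if gate:
--             latest_by_gate[gate] = item
--         elif item.get("status") == "skip":
--             skipped_without_gate += 1
--     skipped_with_gate = sum(1 for item in latest_by_gate.values() if item.get("status") == "skip")
--     return skipped_with_gate + skipped_without_gate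
-- ===== SOURCE B (Python) =====
-- def count_skipped_gates(run: dict) -> int:
--     results = list(run.get("verification", {}).get("results", []))
--     without_gate = sum(
--         1 for item in results
--         if not item.get("gate") and item.get("status") == "skip"
--     )
--     gates = {item.get("gate") for item in results if item.get("gate")}
--     with_gate = sum(
--         1 for g in gates
--         if next(it for it in reversed(results)
--                 if it.get("gate") == g).get("status") == "skip"
--     )
--     return without_gate + with_gate
-- ===== Notes on version B (the rewrite author's own statement) =====
-- stated objective: alternative
-- what changed: Replaces A's stateful forward fold (a latest-item-per-gate dict updated per item, then a scan over its values) by two declarative comprehension sums: a direct count of no-gate skips, plus one backwards find? of the last occurrence for each distinct gate.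
import Mathlib
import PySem

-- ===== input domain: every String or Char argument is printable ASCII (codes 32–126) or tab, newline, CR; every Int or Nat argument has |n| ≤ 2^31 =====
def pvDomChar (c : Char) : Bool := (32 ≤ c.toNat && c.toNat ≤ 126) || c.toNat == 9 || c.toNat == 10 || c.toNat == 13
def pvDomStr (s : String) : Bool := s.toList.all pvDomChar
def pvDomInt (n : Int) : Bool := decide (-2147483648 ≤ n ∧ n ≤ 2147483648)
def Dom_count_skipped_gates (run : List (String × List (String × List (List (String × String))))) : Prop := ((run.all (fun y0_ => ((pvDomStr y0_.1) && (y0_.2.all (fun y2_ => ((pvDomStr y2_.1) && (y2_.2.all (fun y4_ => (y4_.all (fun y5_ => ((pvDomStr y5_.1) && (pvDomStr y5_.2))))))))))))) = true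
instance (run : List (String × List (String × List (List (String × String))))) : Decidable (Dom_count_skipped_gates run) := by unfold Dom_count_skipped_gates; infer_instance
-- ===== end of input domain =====

-- B replaces A's stateful forward fold (latest-per-gate dict + counter) by two staged
-- comprehension sums: a direct count of no-gate skips, plus, for each distinct gate,
-- a backwards search for its last occurrence; return values agree everywhere.

-- ===== PORT A =====
-- item.get(k) on an association-list dict (Python dict lookup)
def pvItemGet (item : List (String × String)) (k : String) : Option String :=
  (PySem.Dict.mk item).get? k

-- A's loop body: latest_by_gate / skipped_without_gate update per item
def pvStepA (st : PySem.Dict String (List (String × String)) × Int)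
    (item : List (String × String)) : PySem.Dict String (List (String × String)) × Int :=
  match pvItemGet item "gate" with
  | some g =>
      if g ≠ "" then (st.1.insert g item, st.2)
      else if pvItemGet item "status" == some "skip" then (st.1, st.2 + 1) else st
  | none => if pvItemGet item "status" == some "skip" then (st.1, st.2 + 1) else st

def count_skipped_gates (run : List (String × List (String × List (List (String × String))))) : Int :=
  let results := ((PySem.Dict.mk (((PySem.Dict.mk run).get? "verification").getD [])).get? "results").getD []
  let st := results.foldl pvStepA (PySem.Dict.empty, 0)
  ((st.1.values.countP (fun item => pvItemGet item "status" == some "skip") : Nat) : Int) + st.2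

-- ===== PORT B =====
def count_skipped_gates_alt (run : List (String × List (String × List (List (String × String))))) : Int :=
  let results := ((PySem.Dict.mk (((PySem.Dict.mk run).get? "verification").getD [])).get? "results").getD []
  -- sum(1 for item in results if not item.get("gate") and item.get("status") == "skip")
  let withoutGate : Int :=
    ((results.countP (fun item =>
        (match (PySem.Dict.mk item).get? "gate" with
         | some g => g == ""
         | none => true)
        && ((PySem.Dict.mk item).get? "status" == some "skip")) : Nat) : Int)
  -- {item.get("gate") for item in results if item.get("gate")}
  let gates : PySem.Set String :=
    PySem.Set.ofList (results.filterMap (fun item =>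
      match (PySem.Dict.mk item).get? "gate" with
      | some g => if g == "" then none else some g
      | none => none))
  -- sum(1 for g in gates if next(it for it in reversed(results) if it.get("gate") == g)
  --       .get("status") == "skip")   — order-independent consumption of the set
  let withGate : Int :=
    ((gates.countP (fun g =>
        match results.reverse.find? (fun it => (PySem.Dict.mk it).get? "gate" == some g) with
        | some it => (PySem.Dict.mk it).get? "status" == some "skip"
        | none => false) : Nat) : Int)
  withoutGate + withGate

-- ===== PRECONDITION & SPEC =====
def Spec_count_skipped_gates (run : List (String × List (String × List (List (String × String))))) (out : Int) : Prop := out = count_skipped_gates_alt run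
instance (run : List (String × List (String × List (List (String × String))))) (out : Int) : Decidable (Spec_count_skipped_gates run out) := by unfold Spec_count_skipped_gates; infer_instance

-- ===== CLAIM (what is proved, stated in full; the proofs are below) =====
def Claim_equal_count_skipped_gates : Prop := ∀ (run : List (String × List (String × List (List (String × String))))), Dom_count_skipped_gates run → Spec_count_skipped_gates run (count_skipped_gates run)

-- ===== LEMMAS AND PROOFS =====

-- truthy gate of an item (None and "" are falsy)
def pvGate? (item : List (String × String)) : Option String :=
  match pvItemGet item "gate" with
  | some g => if g ≠ "" then some g else none
  | none => none

def pvSkip (item : List (String × String)) : Bool :=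
  pvItemGet item "status" == some "skip"

def pvGates (xs : List (List (String × String))) : List String := xs.filterMap pvGate?

-- no-gate skip predicate (B's first comprehension)
def pvNoGateSkip (item : List (String × String)) : Bool :=
  (match pvItemGet item "gate" with
   | some g => g == ""
   | none => true) && pvSkip item

-- last item whose truthy gate is g
def pvLastT (xs : List (List (String × String))) (g : String) : Option (List (String × String)) :=
  xs.reverse.find? (fun it => pvGate? it == some g)

lemma pvStepA_eq (st : PySem.Dict String (List (String × String)) × Int) (item : List (String × String)) :
    pvStepA st item =
      match pvGate? item with
      | some g => (st.1.insert g item, st.2)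
      | none => if pvSkip item then (st.1, st.2 + 1) else st := by
  unfold pvStepA pvGate? pvSkip
  cases pvItemGet item "gate" with
  | none => rfl
  | some g => by_cases h : g ≠ "" <;> simp [h]

lemma pvNoGateSkip_eq (item : List (String × String)) :
    pvNoGateSkip item = (pvGate? item == none && pvSkip item) := by
  unfold pvNoGateSkip pvGate?
  cases pvItemGet item "gate" with
  | none => rfl
  | some g => by_cases h : g = "" <;> simp [h]

lemma pvLastT_cons (x : List (String × String)) (t : List (List (String × String))) (g : String) :
    pvLastT (x :: t) g =
      ((pvLastT t g).or (if pvGate? x == some g then some x else none)) := by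
  unfold pvLastT
  rw [List.reverse_cons, List.find?_append]
  cases h : t.reverse.find? (fun it => pvGate? it == some g) <;>
    cases hpx : (pvGate? x == some g) <;> simp [List.find?, hpx]

-- gate of a truthy-gate item is nonempty
lemma pvGate?_ne_empty {item : List (String × String)} {g : String}
    (h : pvGate? item = some g) : g ≠ "" := by
  unfold pvGate? at h
  cases hx : pvItemGet item "gate" with
  | none => simp [hx] at h
  | some g' =>
      rw [hx] at h
      by_cases hg : g' ≠ "" <;> simp [hg] at h
      exact h ▸ hg

lemma pvGates_ne_empty {xs : List (List (String × String))} {g : String}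
    (h : g ∈ pvGates xs) : g ≠ "" := by
  obtain ⟨it, _, hit⟩ := List.mem_filterMap.mp h
  exact pvGate?_ne_empty hit

-- the invariant of A's fold: counter, lookups and key list
lemma lemA : ∀ (xs : List (List (String × String)))
    (d : PySem.Dict String (List (String × String))) (n : Int), d.keys.Nodup →
    (xs.foldl pvStepA (d, n)).2 = n + ((xs.countP pvNoGateSkip : Nat) : Int) ∧
    (∀ g, (xs.foldl pvStepA (d, n)).1.get? g = (pvLastT xs g).or (d.get? g)) ∧
    (xs.foldl pvStepA (d, n)).1.keys = PySem.Set.update d.keys (pvGates xs) := by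
  intro xs
  induction xs with
  | nil =>
      intro d n _
      refine ⟨by simp, fun g => by simp [pvLastT], by simp [pvGates, PySem.Set.update_nil]⟩
  | cons x t ih =>
      intro d n hn
      simp only [List.foldl_cons, pvStepA_eq]
      cases hx : pvGate? x with
      | some g =>
          have hkn : (d.insert g x).keys.Nodup := PySem.Dict.nodup_keys_insert d g x hn
          obtain ⟨h2, hget, hkeys⟩ := ih (d.insert g x) n hkn
          refine ⟨?_, ?_, ?_⟩
          · rw [h2]
            have : pvNoGateSkip x = false := by
              rw [pvNoGateSkip_eq, hx]; rfl
            simp [this]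
          · intro g'
            rw [hget g', pvLastT_cons, hx]
            cases hlt : pvLastT t g' with
            | some it => simp
            | none =>
                simp only [Option.none_or]
                rw [PySem.Dict.get?_insert]
                by_cases hgg : g' = g
                · subst hgg; simp
                · have : (g == g') = false := by simp [Ne.symm hgg]
                  simp [hgg, this]
          · rw [hkeys]
            have hik : (d.insert g x).keys = PySem.Set.add d.keys g := by
              rw [PySem.Set.add_eq_ite]
              by_cases hc : d.contains g = true
              · rw [PySem.Dict.keys_insert_of_contains _ _ hc,
                    if_pos ((PySem.Dict.contains_iff_mem_keys d g).mp hc)]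
              · have hc' : d.contains g = false := by simpa using hc
                rw [PySem.Dict.keys_insert_of_not_contains _ x hc', if_neg]
                intro hm
                exact hc ((PySem.Dict.contains_iff_mem_keys d g).mpr hm)
            rw [hik, ← PySem.Set.update_cons]
            have : pvGates (x :: t) = g :: pvGates t := by
              simp [pvGates, hx]
            rw [this]
      | none =>
          have hstep : (if pvSkip x then (d, n + 1) else (d, n)) =
              (d, n + (if pvSkip x then 1 else 0)) := by
            by_cases h : pvSkip x <;> simp [h]
          have hg : pvGates (x :: t) = pvGates t := by
            simp [pvGates, hx]
          have hlt : ∀ g', pvLastT (x :: t) g' = pvLastT t g' := by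
            intro g'
            rw [pvLastT_cons, hx]
            cases pvLastT t g' <;> simp
          have hns : pvNoGateSkip x = pvSkip x := by
            rw [pvNoGateSkip_eq, hx]; simp
          obtain ⟨h2, hget, hkeys⟩ := ih d (n + (if pvSkip x then 1 else 0)) hn
          rw [hstep]
          refine ⟨?_, fun g' => by rw [hget g', hlt g'], by rw [hkeys, hg]⟩
          rw [h2, List.countP_cons, hns]
          by_cases h : pvSkip x <;> simp [h] <;> ring

-- find? congruence under a pointwise-equal predicate
lemma pvFindCongr {α : Type} {p q : α → Bool} : ∀ (l : List α), (∀ x ∈ l, p x = q x) → l.find? p = l.find? q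
  | [], _ => rfl
  | x :: t, h => by
      simp only [List.find?]
      rw [h x (by simp)]
      cases q x
      · exact pvFindCongr t (fun y hy => h y (by simp [hy]))
      · rfl

-- B's find? predicate agrees with the truthy-gate one when g ≠ ""
lemma pvFind_eq (xs : List (List (String × String))) (g : String) (hg : g ≠ "") :
    xs.reverse.find? (fun it => (PySem.Dict.mk it).get? "gate" == some g) = pvLastT xs g := by
  unfold pvLastT
  apply pvFindCongr
  intro it _
  unfold pvGate? pvItemGet
  cases h : (PySem.Dict.mk it).get? "gate" with
  | none => rfl
  | some g' =>
      by_cases h' : g' ≠ ""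
      · simp [h']
      · have : g' = "" := by simpa using h'
        subst this
        simp [Ne.symm hg]

-- B's set-comprehension filter is the truthy-gate extractor
lemma pvGateFn_eq :
    (fun item => match (PySem.Dict.mk item).get? "gate" with
      | some g => if g == "" then none else some g
      | none => none) = pvGate? := by
  funext item
  unfold pvGate? pvItemGet
  cases (PySem.Dict.mk item).get? "gate" with
  | none => rfl
  | some g => by_cases h : g = "" <;> simp [h]

-- core equality on the extracted results list
lemma pvMain (results : List (List (String × String))) :
    (((results.foldl pvStepA (PySem.Dict.empty, 0)).1.values.countP
        (fun item => pvItemGet item "status" == some "skip") : Nat) : Int) +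
      (results.foldl pvStepA (PySem.Dict.empty, 0)).2 =
    ((results.countP (fun item =>
        (match (PySem.Dict.mk item).get? "gate" with
         | some g => g == ""
         | none => true)
        && ((PySem.Dict.mk item).get? "status" == some "skip")) : Nat) : Int) +
    (((PySem.Set.ofList (results.filterMap (fun item =>
        match (PySem.Dict.mk item).get? "gate" with
        | some g => if g == "" then none else some g
        | none => none))).countP (fun g =>
        match results.reverse.find? (fun it => (PySem.Dict.mk it).get? "gate" == some g) with
        | some it => (PySem.Dict.mk it).get? "status" == some "skip"
        | none => false) : Nat) : Int) := by
  have hn0 : (PySem.Dict.empty : PySem.Dict String (List (String × String))).keys.Nodup := by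
    simp [PySem.Dict.empty, PySem.Dict.keys]
  obtain ⟨h2, hget, hkeys⟩ := lemA results PySem.Dict.empty 0 hn0
  set F := results.foldl pvStepA (PySem.Dict.empty, 0) with hF
  have hFk : F.1.keys.Nodup := by
    rw [hkeys]
    exact PySem.Set.nodup_update _ _ hn0
  have hgets : ∀ g, F.1.get? g = pvLastT results g := by
    intro g
    rw [hget g]
    cases pvLastT results g <;> rfl
  -- values count → keys count over the lookup
  have hval : F.1.values.countP (fun item => pvItemGet item "status" == some "skip") =
      F.1.keys.countP (fun g =>
        match pvLastT results g with
        | some it => pvSkip it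
        | none => false) := by
    show (F.1.items.map (·.2)).countP _ = (F.1.items.map (·.1)).countP _
    rw [List.countP_map, List.countP_map]
    apply List.countP_congr
    intro p hp
    obtain ⟨k, v⟩ := p
    have hpq : F.1.get? k = some v := PySem.Dict.get?_of_mem_items F.1 hp hFk
    rw [hgets k] at hpq
    simp [Function.comp, hpq, pvSkip]
  -- the key list is B's gate set
  have hkeys' : F.1.keys = PySem.Set.ofList (results.filterMap (fun item =>
      match (PySem.Dict.mk item).get? "gate" with
      | some g => if g == "" then none else some g
      | none => none)) := by
    rw [hkeys, pvGateFn_eq]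
    simp [PySem.Dict.empty, PySem.Dict.keys, PySem.Set.update_nil_left, pvGates]
  -- the per-gate predicates agree on members of the gate set
  have hpred : F.1.keys.countP (fun g =>
        match pvLastT results g with
        | some it => pvSkip it
        | none => false) =
      F.1.keys.countP (fun g =>
        match results.reverse.find? (fun it => (PySem.Dict.mk it).get? "gate" == some g) with
        | some it => (PySem.Dict.mk it).get? "status" == some "skip"
        | none => false) := by
    apply List.countP_congr
    intro g hgmem
    have hgin : g ∈ pvGates results := by
      have := hgmem
      rw [hkeys] at this
      rcases (PySem.Set.mem_update _ _ _).mp this with h | h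
      · simp [PySem.Dict.empty, PySem.Dict.keys] at h
      · exact h
    rw [pvFind_eq results g (pvGates_ne_empty hgin)]
    cases pvLastT results g <;> simp [pvSkip, pvItemGet]
  -- first-comprehension predicate is pvNoGateSkip
  have hng : results.countP (fun item =>
      (match (PySem.Dict.mk item).get? "gate" with
       | some g => g == ""
       | none => true)
      && ((PySem.Dict.mk item).get? "status" == some "skip")) = results.countP pvNoGateSkip := by
    apply List.countP_congr
    intro it _
    simp [pvNoGateSkip, pvSkip, pvItemGet]
  rw [hval, hpred, hkeys'] at *
  rw [h2, ← hkeys', hng]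
  ring

-- ===== VERDICT (by name: the statement is the Claim_ definition above) =====
theorem count_skipped_gates_spec : Claim_equal_count_skipped_gates := by
  intro run _
  unfold Spec_count_skipped_gates count_skipped_gates count_skipped_gates_alt
  dsimp only
  exact pvMain (((PySem.Dict.mk (((PySem.Dict.mk run).get? "verification").getD [])).get? "results").getD [])
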